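-- pv_equiv track=rewrite | github.com/Checkmate50/dm_terminal | src/gen_potion.py | gen_rarity
-- ===== SOURCE A (Python) =====
-- def gen_rarity(level):
--     unchecked = []
--     to_return = []
--     for i in range(1, min(6, level)):
--         temp = rarity_recursive(level, i, i)
--         for j in temp:
--             j.append(i)
--             unchecked.append(j)
--     for i in unchecked:
--         if len(i) <= 6 and (level == 5 or len(i) > 2):
--             to_return.append(i)
--     return to_return
--
-- def rarity_recursive(level, m, u):
--     to_return = []
--     i = 1
--     for i in range(1, min(u, level - m) + 1):
--         temp = rarity_recursive(level, i + m, i)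
--         for j in temp:
--             j.append(i)
--             to_return.append(j)
--     if i + m == level:
--         to_return.append([i])
--     return to_return
-- ===== SOURCE B (Python) =====
-- def _desc_parts(rem, cap, slots):
--     # descending partitions of rem with parts <= cap, length <= slots,
--     # in ascending lexicographic order of the descending list
--     if rem == 0:
--         return [[]]
--     if slots <= 0:
--         return []
--     res = []
--     for p in range(1, min(cap, rem) + 1):
--         for rest in _desc_parts(rem - p, p, slots - 1):
--             res.append([p] + rest)
--     return res
--
-- def gen_rarity(level):
--     cap = min(6, level) - 1
--     need = 2 if level == 5 else 3
--     out = []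
--     for part in _desc_parts(level, cap, 6):
--         if len(part) >= need:
--             out.append(part[::-1])
--     return out
-- ===== Notes on version B (the rewrite author's own statement) =====
-- stated objective: faster
-- what changed: B generates descending partitions directly with a length-pruned recursive generator (parts <= cap, at most 6 slots, ascending-lex order) and reverses each survivor, instead of A's unbounded interleaved DFS that builds every partition of level into parts <= 5 and filters by length afterwards.
import Mathlib
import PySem

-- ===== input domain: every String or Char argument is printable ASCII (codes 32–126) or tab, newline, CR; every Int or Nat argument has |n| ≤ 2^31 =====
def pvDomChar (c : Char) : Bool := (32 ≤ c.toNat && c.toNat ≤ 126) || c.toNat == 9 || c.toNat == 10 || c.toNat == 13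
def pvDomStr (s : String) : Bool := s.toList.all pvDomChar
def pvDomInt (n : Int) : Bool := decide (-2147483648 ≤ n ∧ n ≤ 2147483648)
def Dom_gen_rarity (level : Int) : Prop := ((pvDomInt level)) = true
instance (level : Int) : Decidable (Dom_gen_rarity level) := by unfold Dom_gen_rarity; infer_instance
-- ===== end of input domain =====

-- B replaces A's unbounded DFS + post-filter by a length-pruned recursive partition
-- generator; same return value on all of Dom (faster in a timing run).

-- ===== PORT A =====
-- fuel is only a termination guard: every call site passes fuel = (level - m).toNat,
-- which the recursion preserves, so the fuel-0 branch is the residue of the general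
-- body when level - m ≤ 0 (empty loop, leftover i = 1).
def rarity_recursive : Nat → Int → Int → Int → List (List Int)
  | 0, level, m, _ =>
      if 1 + m = level then [[1]] else []
  | f+1, level, m, u =>
      let k := min u (level - m)
      let to_return := (PySem.List.pyRange 1 (k + 1) 1).foldl
          (fun acc i => acc ++ (rarity_recursive f level (i + m) i).map (fun j => j ++ [i])) []
      -- Python's leftover loop variable: i = k after a non-empty loop, else the initial i = 1
      let fin := if 1 ≤ k then k else 1
      if fin + m = level then to_return ++ [[fin]] else to_return

def gen_rarity (level : Int) : List (List Int) :=
  let unchecked := (PySem.List.pyRange 1 (min 6 level) 1).foldl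
      (fun acc i => acc ++ (rarity_recursive (level - i).toNat level i i).map (fun j => j ++ [i])) []
  unchecked.foldl
    (fun tr i => if i.length ≤ 6 ∧ (level = 5 ∨ 2 < i.length) then tr ++ [i] else tr) []

-- ===== PORT B =====
-- slots counts remaining length budget; Source B's 'slots <= 0' guard is the Nat-0 case
-- (all call sites pass non-negative slots).
def desc_parts (rem cap : Int) : Nat → List (List Int)
  | 0 => if rem = 0 then [[]] else []
  | s+1 =>
    if rem = 0 then [[]]
    else (PySem.List.pyRange 1 (min cap rem + 1) 1).foldl
          (fun res p => res ++ (desc_parts (rem - p) p s).map (fun rest => p :: rest)) []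

def gen_rarity_alt (level : Int) : List (List Int) :=
  let cap := min 6 level - 1
  let need : Nat := if level = 5 then 2 else 3
  (desc_parts level cap 6).foldl
    (fun out part => if need ≤ part.length then out ++ [part.reverse] else out) []

-- ===== PRECONDITION & SPEC =====
-- Pre_ excludes large levels, on which Python A does not return: its DFS recursion depth
-- grows linearly with level, so A overflows the interpreter stack (RecursionError) near the
-- default recursion limit; the bound leaves a margin since the exact cutoff depends on the
-- surrounding stack.
def Pre_gen_rarity (level : Int) : Prop := level ≤ 900
instance (level : Int) : Decidable (Pre_gen_rarity level) := by unfold Pre_gen_rarity; infer_instance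
def pvWitness_gen_rarity : Int := (10)

def Spec_gen_rarity (level : Int) (out : List (List Int)) : Prop := out = gen_rarity_alt level
instance (level : Int) (out : List (List Int)) : Decidable (Spec_gen_rarity level out) := by unfold Spec_gen_rarity; infer_instance

-- ===== CLAIM (what is proved, stated in full; the proofs are below) =====
def Claim_equal_gen_rarity : Prop := ∀ (level : Int), Dom_gen_rarity level → Pre_gen_rarity level → Spec_gen_rarity level (gen_rarity level)

-- ===== LEMMAS AND PROOFS =====

-- every list produced by rarity_recursive (with sufficient fuel) sums to level - m
-- and has entries in [1, u]
theorem rr_mem (f : Nat) (level m u : Int) (hf : (level - m).toNat ≤ f) (hu : 1 ≤ u) :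
    ∀ j ∈ rarity_recursive f level m u, j.sum = level - m ∧ ∀ x ∈ j, 1 ≤ x ∧ x ≤ u := by
  induction f generalizing m u with
  | zero =>
    intro j hj
    simp only [rarity_recursive] at hj
    by_cases hb : 1 + m = level
    · rw [if_pos hb] at hj
      simp only [List.mem_singleton] at hj
      subst hj
      refine ⟨by simp; omega, ?_⟩
      intro x hx; simp at hx; omega
    · rw [if_neg hb] at hj
      simp at hj
  | succ f ih =>
    intro j hj
    simp only [rarity_recursive] at hj
    rw [PySem.List.foldl_append_eq_flatMap] at hj
    rw [List.nil_append] at hj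
    have key : ∀ j', j' ∈ (PySem.List.pyRange 1 (min u (level - m) + 1) 1).flatMap
        (fun i => (rarity_recursive f level (i + m) i).map (fun j => j ++ [i])) →
        j'.sum = level - m ∧ ∀ x ∈ j', 1 ≤ x ∧ x ≤ u := by
      intro j' hj'
      rw [List.mem_flatMap] at hj'
      obtain ⟨i, hi, hj'⟩ := hj'
      rw [PySem.List.mem_pyRange_one] at hi
      rw [List.mem_map] at hj'
      obtain ⟨jj, hjj, rfl⟩ := hj'
      have hik : (1:Int) ≤ i ∧ i ≤ u ∧ i ≤ level - m := by
        have h1 := hi.1; have h2 := hi.2; omega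
      obtain ⟨hjs, hje⟩ := ih (i + m) i (by omega) hik.1 jj hjj
      constructor
      · rw [List.sum_append]; simp [hjs]; omega
      · intro x hx
        rw [List.mem_append] at hx
        rcases hx with hx | hx
        · have := hje x hx; omega
        · simp at hx; omega
    by_cases hk : (1:Int) ≤ min u (level - m)
    · simp only [if_pos hk] at hj
      by_cases hfin : min u (level - m) + m = level
      · rw [if_pos hfin] at hj
        rcases List.mem_append.1 hj with hj | hj
        · exact key j hj
        · simp only [List.mem_singleton] at hj
          subst hj
          refine ⟨by simp; omega, ?_⟩
          intro x hx; simp at hx; subst hx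
          have : min u (level - m) ≤ u := min_le_left _ _
          omega
      · rw [if_neg hfin] at hj
        exact key j hj
    · simp only [if_neg hk] at hj
      by_cases hfin : (1:Int) + m = level
      · rw [if_pos hfin] at hj
        rcases List.mem_append.1 hj with hj | hj
        · exact key j hj
        · simp only [List.mem_singleton] at hj
          subst hj
          refine ⟨by simp; omega, ?_⟩
          intro x hx; simp at hx; omega
      · rw [if_neg hfin] at hj
        exact key j hj

-- any integer list with entries ≤ 5 has sum ≤ 5 * length
theorem sum_le_five (l : List Int) (h : ∀ x ∈ l, x ≤ 5) : l.sum ≤ 5 * l.length := by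
  induction l with
  | nil => simp
  | cons a t ih =>
    have ha := h a (by simp)
    have ht := ih (fun x hx => h x (by simp [hx]))
    simp only [List.sum_cons, List.length_cons]
    push_cast
    omega

-- A returns [] for level ≥ 31: every candidate sums to level with parts ≤ 5,
-- so a length-≤-6 candidate would force level ≤ 30
theorem gen_rarity_high (level : Int) (h : 31 ≤ level) : gen_rarity level = [] := by
  unfold gen_rarity
  dsimp only
  rw [PySem.List.foldl_append_eq_flatMap, List.nil_append]
  rw [PySem.List.foldl_append_ite_eq_filter, List.nil_append]
  rw [List.filter_eq_nil_iff]
  intro j hj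
  rw [List.mem_flatMap] at hj
  obtain ⟨i, hi, hj⟩ := hj
  rw [PySem.List.mem_pyRange_one] at hi
  have hi6 : min 6 level = 6 := by omega
  rw [hi6] at hi
  rw [List.mem_map] at hj
  obtain ⟨jj, hjj, rfl⟩ := hj
  obtain ⟨hjs, hje⟩ := rr_mem _ level i i (le_refl _) hi.1 jj hjj
  simp only [decide_eq_true_eq, not_and, not_or]
  intro hlen
  have hsum : (jj ++ [i]).sum = level := by rw [List.sum_append]; simp [hjs]
  have hbound : ∀ x ∈ jj ++ [i], x ≤ 5 := by
    intro x hx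
    rw [List.mem_append] at hx
    rcases hx with hx | hx
    · have := hje x hx; omega
    · simp at hx; omega
  have := sum_le_five _ hbound
  rw [hsum] at this
  simp only [List.length_append, List.length_singleton] at *
  constructor
  · omega
  · omega

-- B's generator is empty when rem exceeds cap * slots (too few slots)
theorem dp_nil : ∀ (s : Nat) (rem cap : Int), 0 < rem → cap * s < rem → desc_parts rem cap s = [] := by
  intro s
  induction s with
  | zero =>
    intro rem cap h0 _
    simp only [desc_parts]
    rw [if_neg (by omega)]
  | succ s ih =>
    intro rem cap h0 hlt
    simp only [desc_parts]
    rw [if_neg (by omega)]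
    rw [PySem.List.foldl_append_eq_flatMap, List.nil_append]
    rw [List.flatMap_eq_nil_iff]
    intro p hp
    rw [PySem.List.mem_pyRange_one] at hp
    have hp1 : (1:Int) ≤ p := hp.1
    have hpc : p ≤ cap ∧ p ≤ rem := by
      have := hp.2; omega
    have hrp : 0 < rem - p := by
      rcases lt_or_eq_of_le (by omega : p ≤ rem) with h | h
      · omega
      · exfalso; push_cast at hlt; nlinarith [hpc.1, hp1]
    have : desc_parts (rem - p) p s = [] := by
      apply ih _ _ hrp
      push_cast at hlt ⊢
      nlinarith [hpc.1]
    rw [this]; simp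

theorem gen_rarity_alt_high (level : Int) (h : 31 ≤ level) : gen_rarity_alt level = [] := by
  unfold gen_rarity_alt
  dsimp only
  have hc : min 6 level - 1 = 5 := by omega
  rw [hc]
  rw [dp_nil 6 level 5 (by omega) (by push_cast; omega)]
  simp

theorem low_eq (level : Int) (h : level ≤ 1) : gen_rarity level = gen_rarity_alt level := by
  have ha : gen_rarity level = [] := by
    unfold gen_rarity
    dsimp only
    rw [show min 6 level = level by omega, PySem.List.pyRange_one_eq_nil (by omega)]
    rfl
  have hb : gen_rarity_alt level = [] := by
    unfold gen_rarity_alt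
    dsimp only
    rcases eq_or_ne level 0 with rfl | hne
    · decide
    · rw [show (6:Nat) = 5 + 1 from rfl]
      simp only [desc_parts]
      rw [if_neg hne]
      have hle : min (min 6 level - 1) level + 1 ≤ 1 := by
        have := min_le_left (min 6 level - 1) level
        omega
      rw [PySem.List.pyRange_one_eq_nil hle]
      rfl
  rw [ha, hb]

-- ===== VERDICT (by name: the statement is the Claim_ definition above) =====
set_option maxRecDepth 100000 in
set_option maxHeartbeats 4000000 in
theorem gen_rarity_spec : Claim_equal_gen_rarity := by
  intro level _ _
  unfold Spec_gen_rarity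
  rcases le_or_gt level 1 with h | h
  · exact low_eq level h
  rcases le_or_gt 31 level with h31 | h31
  · rw [gen_rarity_high level h31, gen_rarity_alt_high level h31]
  · interval_cases level <;> decide
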